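-- pv_equiv track=rewrite | github.com/wangrdotcom/wangrcli | src/wangr/chat_screen.py | _parse_begin_patch
-- ===== SOURCE A (Python) =====
-- from typing import Any
--
-- def _parse_begin_patch(patch: str) -> list[dict[str, Any]]:
--     operations: list[dict[str, Any]] = []
--     lines = patch.splitlines()
--     idx = 0
--     while idx < len(lines):
--         line = lines[idx]
--         if line.startswith("*** Add File: "):
--             path = line.replace("*** Add File: ", "", 1).strip()
--             idx += 1
--             content_lines = []
--             while idx < len(lines) and not lines[idx].startswith("*** "):
--                 if lines[idx].startswith("+"):
--                     content_lines.append(lines[idx][1:])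
--                 idx += 1
--             operations.append(
--                 {"type": "create_file", "path": path, "diff": "\n".join(content_lines)}
--             )
--             continue
--         if line.startswith("*** Update File: "):
--             path = line.replace("*** Update File: ", "", 1).strip()
--             idx += 1
--             diff_lines = []
--             while idx < len(lines) and not lines[idx].startswith("*** "):
--                 diff_lines.append(lines[idx])
--                 idx += 1
--             operations.append(
--                 {"type": "update_file", "path": path, "diff": "\n".join(diff_lines)}
--             )
--             continue
--         if line.startswith("*** Delete File: "):
--             path = line.replace("*** Delete File: ", "", 1).strip()
--             operations.append({"type": "delete_file", "path": path})
--         idx += 1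
--     return operations
-- ===== SOURCE B (Python) =====
-- def _parse_begin_patch(patch):
--     operations = []
--     mode = None
--     path = ""
--     buf = []
--     for line in patch.splitlines():
--         if line.startswith("*** "):
--             if mode == "create":
--                 operations.append({"type": "create_file", "path": path, "diff": "\n".join(buf)})
--             elif mode == "update":
--                 operations.append({"type": "update_file", "path": path, "diff": "\n".join(buf)})
--             mode = None
--             if line.startswith("*** Add File: "):
--                 mode = "create"
--                 path = line[len("*** Add File: "):].strip()
--                 buf = []
--             elif line.startswith("*** Update File: "):
--                 mode = "update"
--                 path = line[len("*** Update File: "):].strip()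
--                 buf = []
--             elif line.startswith("*** Delete File: "):
--                 operations.append({"type": "delete_file", "path": line[len("*** Delete File: "):].strip()})
--         elif mode == "create":
--             if line.startswith("+"):
--                 buf.append(line[1:])
--         elif mode == "update":
--             buf.append(line)
--     if mode == "create":
--         operations.append({"type": "create_file", "path": path, "diff": "\n".join(buf)})
--     elif mode == "update":
--         operations.append({"type": "update_file", "path": path, "diff": "\n".join(buf)})
--     return operations
-- ===== Notes on version B (the rewrite author's own statement) =====
-- stated objective: simpler
-- what changed: Replaces A's index-driven outer while loop with nested inner collecting while loops by a single for-loop over the lines maintaining a mode/path/buffer state machine that flushes the pending section at each section-header line and once after the loop.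
import Mathlib
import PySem

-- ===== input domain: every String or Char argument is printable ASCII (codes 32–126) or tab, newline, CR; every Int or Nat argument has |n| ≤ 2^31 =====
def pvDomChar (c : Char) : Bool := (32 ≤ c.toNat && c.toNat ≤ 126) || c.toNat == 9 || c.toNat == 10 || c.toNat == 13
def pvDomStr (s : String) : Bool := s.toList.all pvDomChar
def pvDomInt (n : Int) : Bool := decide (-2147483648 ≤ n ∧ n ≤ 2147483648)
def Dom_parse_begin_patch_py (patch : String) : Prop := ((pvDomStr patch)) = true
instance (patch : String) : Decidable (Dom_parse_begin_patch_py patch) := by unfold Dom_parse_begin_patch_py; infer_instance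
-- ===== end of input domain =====

-- B replaces A's index-driven outer/inner while loops by a single pass over the lines with an explicit
-- mode/buffer state machine (objective: simpler decomposition; same O(n) cost).

-- ===== PORT A =====

-- hand port of s.replace(old, "", 1) (PySem.Str.replace has no count argument): drop the FIRST occurrence of old
def pvRemoveFirst (s old : List Char) : List Char :=
  match s with
  | [] => []
  | c :: rest => if PySem.Chars.startswith (c :: rest) old then (c :: rest).drop old.length
                 else c :: pvRemoveFirst rest old

def pvReplace1 (s old : String) : String := String.ofList (pvRemoveFirst s.toList old.toList)

def pvNotHdr (l : String) : Bool := !(PySem.Str.startswith l "*** ")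

def pvPlusBody (x : String) : Option String :=
  if PySem.Str.startswith x "+" then some (PySem.Str.slice x (some 1) none) else none

-- outer while loop of A over the remaining lines; the two inner collecting while loops are the
-- takeWhile/dropWhile pair over the same 'not lines[idx].startswith("*** ")' test
def pvGoA : List String → List (List (String × String))
  | [] => []
  | l :: rest =>
    if PySem.Str.startswith l "*** Add File: " then
      [("type", "create_file"),
       ("path", PySem.Str.strip (pvReplace1 l "*** Add File: ")),
       ("diff", PySem.Str.join "\n" ((rest.takeWhile pvNotHdr).filterMap pvPlusBody))]
        :: pvGoA (rest.dropWhile pvNotHdr)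
    else if PySem.Str.startswith l "*** Update File: " then
      [("type", "update_file"),
       ("path", PySem.Str.strip (pvReplace1 l "*** Update File: ")),
       ("diff", PySem.Str.join "\n" (rest.takeWhile pvNotHdr))]
        :: pvGoA (rest.dropWhile pvNotHdr)
    else if PySem.Str.startswith l "*** Delete File: " then
      [("type", "delete_file"), ("path", PySem.Str.strip (pvReplace1 l "*** Delete File: "))]
        :: pvGoA rest
    else pvGoA rest
termination_by lines => lines.length
decreasing_by
  · exact Nat.lt_succ_of_le (List.length_dropWhile_le _ _)
  · exact Nat.lt_succ_of_le (List.length_dropWhile_le _ _)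
  · exact Nat.lt_succ_of_le (Nat.le_refl _)
  · exact Nat.lt_succ_of_le (Nat.le_refl _)

def parse_begin_patch_py (patch : String) : List (List (String × String)) :=
  pvGoA (PySem.Str.splitlines patch)

-- ===== PORT B =====

inductive PvMode | none | create | update
deriving DecidableEq, Repr

-- the pending section (if any) as the operation(s) it flushes to
def pvFlush : PvMode → String → List String → List (List (String × String))
  | PvMode.none, _, _ => []
  | PvMode.create, p, b =>
      [[("type", "create_file"), ("path", p), ("diff", PySem.Str.join "\n" b)]]
  | PvMode.update, p, b =>
      [[("type", "update_file"), ("path", p), ("diff", PySem.Str.join "\n" b)]]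

def pvStepB (s : PvMode × String × List String × List (List (String × String))) (l : String) :
    PvMode × String × List String × List (List (String × String)) :=
  let (m, p, b, ops) := s
  if PySem.Str.startswith l "*** " then
    let ops1 := ops ++ pvFlush m p b
    if PySem.Str.startswith l "*** Add File: " then
      (PvMode.create, PySem.Str.strip (PySem.Str.slice l (some 14) none), [], ops1)
    else if PySem.Str.startswith l "*** Update File: " then
      (PvMode.update, PySem.Str.strip (PySem.Str.slice l (some 17) none), [], ops1)
    else if PySem.Str.startswith l "*** Delete File: " then
      (PvMode.none, p, b,
        ops1 ++ [[("type", "delete_file"), ("path", PySem.Str.strip (PySem.Str.slice l (some 17) none))]])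
    else (PvMode.none, p, b, ops1)
  else
    match m with
    | PvMode.create =>
        if PySem.Str.startswith l "+" then (m, p, b ++ [PySem.Str.slice l (some 1) none], ops)
        else (m, p, b, ops)
    | PvMode.update => (m, p, b ++ [l], ops)
    | PvMode.none => (m, p, b, ops)

def parse_begin_patch_py_alt (patch : String) : List (List (String × String)) :=
  let s := (PySem.Str.splitlines patch).foldl pvStepB (PvMode.none, "", [], [])
  s.2.2.2 ++ pvFlush s.1 s.2.1 s.2.2.1

-- ===== PRECONDITION & SPEC =====
def Spec_parse_begin_patch_py (patch : String) (out : List (List (String × String))) : Prop := out = parse_begin_patch_py_alt patch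
instance (patch : String) (out : List (List (String × String))) : Decidable (Spec_parse_begin_patch_py patch out) := by unfold Spec_parse_begin_patch_py; infer_instance

-- ===== CLAIM (what is proved, stated in full; the proofs are below) =====
def Claim_equal_parse_begin_patch_py : Prop := ∀ (patch : String), Dom_parse_begin_patch_py patch → Spec_parse_begin_patch_py patch (parse_begin_patch_py patch)

-- ===== LEMMAS AND PROOFS =====

-- run B's fold from an arbitrary state, then flush
def pvRunB (st : PvMode × String × List String × List (List (String × String)))
    (lines : List String) : List (List (String × String)) :=
  let s := lines.foldl pvStepB st
  s.2.2.2 ++ pvFlush s.1 s.2.1 s.2.2.1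

-- what A produces from the middle of an open section with pending path p / buffer b
def pvContA (p : String) (b : List String) (lines : List String) : List (List (String × String)) :=
  [("type", "create_file"), ("path", p),
   ("diff", PySem.Str.join "\n" (b ++ (lines.takeWhile pvNotHdr).filterMap pvPlusBody))]
    :: pvGoA (lines.dropWhile pvNotHdr)

def pvContU (p : String) (b : List String) (lines : List String) : List (List (String × String)) :=
  [("type", "update_file"), ("path", p),
   ("diff", PySem.Str.join "\n" (b ++ lines.takeWhile pvNotHdr))]
    :: pvGoA (lines.dropWhile pvNotHdr)

def pvCont : PvMode → String → List String → List String → List (List (String × String))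
  | PvMode.none, _, _, lines => pvGoA lines
  | PvMode.create, p, b, lines => pvContA p b lines
  | PvMode.update, p, b, lines => pvContU p b lines

-- a line that does not start with "*** " starts with none of the three section headers
lemma pv_hdr_false {l pre : List Char} (hsub : ['*', '*', '*', ' '] <+: pre)
    (h : PySem.Chars.startswith l ['*', '*', '*', ' '] = false) :
    PySem.Chars.startswith l pre = false := by
  rw [← Bool.not_eq_true] at h ⊢
  intro hc
  exact h ((PySem.Chars.startswith_iff _ _).mpr
    (hsub.trans ((PySem.Chars.startswith_iff _ _).mp hc)))

lemma pv_removeFirst_of_prefix (s old : List Char) (h : PySem.Chars.startswith s old = true) :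
    pvRemoveFirst s old = s.drop old.length := by
  cases s with
  | nil =>
    have : old = [] := List.prefix_nil.mp ((PySem.Chars.startswith_iff _ _).mp h)
    simp [pvRemoveFirst, this]
  | cons c rest => simp [pvRemoveFirst, h]

-- A's replace(hdr, "", 1) on a line that starts with hdr is B's slice line[len(hdr):]
lemma pv_path_eq (l pre : String) (h : PySem.Chars.startswith l.toList pre.toList = true) :
    pvReplace1 l pre = PySem.Str.slice l (some (pre.toList.length : Int)) none := by
  apply String.toList_inj.mp
  rw [pvReplace1, String.toList_ofList]
  simp only [PySem.Str.toList_slice, PySem.Chars.slice_eq_listSlice, PySem.List.slice_from_natCast]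
  exact pv_removeFirst_of_prefix _ _ h

lemma pv_main (lines : List String) :
    ∀ (m : PvMode) (p : String) (b : List String) (ops : List (List (String × String))),
      pvRunB (m, p, b, ops) lines = ops ++ pvCont m p b lines := by
  induction lines with
  | nil =>
    intro m p b ops
    cases m <;> simp [pvRunB, pvCont, pvContA, pvContU, pvGoA, pvFlush]
  | cons l t ih =>
    intro m p b ops
    by_cases hS : PySem.Str.startswith l "*** " = true
    · -- header line: every mode first flushes, then dispatches l the same way
      simp only [PySem.Str.startswith_eq] at hS
      simp at hS
      have hflush : pvCont m p b (l :: t) = pvFlush m p b ++ pvGoA (l :: t) := by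
        cases m <;> simp [pvCont, pvContA, pvContU, pvFlush, pvNotHdr, hS]
      by_cases hA : PySem.Str.startswith l "*** Add File: " = true
      · simp at hA
        have hgo : pvGoA (l :: t) = pvCont PvMode.create
            (PySem.Str.strip (PySem.Str.slice l (some 14) none)) [] t := by
          rw [pvGoA]
          simp [hA, pvCont, pvContA, pv_path_eq l "*** Add File: " (by simpa using hA)]
        have hstep : pvRunB (m, p, b, ops) (l :: t) =
            pvRunB (PvMode.create, PySem.Str.strip (PySem.Str.slice l (some 14) none), [],
              ops ++ pvFlush m p b) t := by
          cases m <;> simp [pvRunB, pvStepB, hS, hA, pvFlush]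
        rw [hstep, ih, hflush, hgo, List.append_assoc]
      · simp at hA
        by_cases hU : PySem.Str.startswith l "*** Update File: " = true
        · simp at hU
          have hgo : pvGoA (l :: t) = pvCont PvMode.update
              (PySem.Str.strip (PySem.Str.slice l (some 17) none)) [] t := by
            rw [pvGoA]
            simp [hA, hU, pvCont, pvContU, pv_path_eq l "*** Update File: " (by simpa using hU)]
          have hstep : pvRunB (m, p, b, ops) (l :: t) =
              pvRunB (PvMode.update, PySem.Str.strip (PySem.Str.slice l (some 17) none), [],
                ops ++ pvFlush m p b) t := by
            cases m <;> simp [pvRunB, pvStepB, hS, hA, hU, pvFlush]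
          rw [hstep, ih, hflush, hgo, List.append_assoc]
        · simp at hU
          by_cases hD : PySem.Str.startswith l "*** Delete File: " = true
          · simp at hD
            have hgo : pvGoA (l :: t) =
                [("type", "delete_file"),
                 ("path", PySem.Str.strip (PySem.Str.slice l (some 17) none))] :: pvGoA t := by
              rw [pvGoA]
              simp [hA, hU, hD, pv_path_eq l "*** Delete File: " (by simpa using hD)]
            have hstep : pvRunB (m, p, b, ops) (l :: t) =
                pvRunB (PvMode.none, p, b, (ops ++ pvFlush m p b) ++
                  [[("type", "delete_file"),
                    ("path", PySem.Str.strip (PySem.Str.slice l (some 17) none))]]) t := by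
              cases m <;> simp [pvRunB, pvStepB, hS, hA, hU, hD, pvFlush]
            rw [hstep, ih, hflush, hgo]
            simp [pvCont]
          · simp at hD
            have hgo : pvGoA (l :: t) = pvGoA t := by
              rw [pvGoA]; simp [hA, hU, hD]
            have hstep : pvRunB (m, p, b, ops) (l :: t) =
                pvRunB (PvMode.none, p, b, ops ++ pvFlush m p b) t := by
              cases m <;> simp [pvRunB, pvStepB, hS, hA, hU, hD, pvFlush]
            rw [hstep, ih, hflush, hgo]
            simp [pvCont]
    · -- body line: depends on the current mode only
      simp only [PySem.Str.startswith_eq] at hS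
      simp at hS
      have hA := pv_hdr_false (pre := "*** Add File: ".toList) (by decide) hS
      have hU := pv_hdr_false (pre := "*** Update File: ".toList) (by decide) hS
      have hD := pv_hdr_false (pre := "*** Delete File: ".toList) (by decide) hS
      simp at hA hU hD
      have hgo : pvGoA (l :: t) = pvGoA t := by
        rw [pvGoA]; simp [hA, hU, hD]
      cases m with
      | none =>
        have hstep : pvRunB (PvMode.none, p, b, ops) (l :: t) =
            pvRunB (PvMode.none, p, b, ops) t := by
          simp [pvRunB, pvStepB, hS]
        rw [hstep, ih, pvCont, pvCont, hgo]
      | create =>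
        by_cases hP : PySem.Str.startswith l "+" = true
        · simp at hP
          have hstep : pvRunB (PvMode.create, p, b, ops) (l :: t) =
              pvRunB (PvMode.create, p, b ++ [PySem.Str.slice l (some 1) none], ops) t := by
            simp [pvRunB, pvStepB, hS, hP]
          rw [hstep, ih]
          simp [pvCont, pvContA, pvNotHdr, hS,
            pvPlusBody, hP]
        · simp at hP
          have hstep : pvRunB (PvMode.create, p, b, ops) (l :: t) =
              pvRunB (PvMode.create, p, b, ops) t := by
            simp [pvRunB, pvStepB, hS, hP]
          rw [hstep, ih]
          simp [pvCont, pvContA, pvNotHdr, hS,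
            pvPlusBody, hP]
      | update =>
        have hstep : pvRunB (PvMode.update, p, b, ops) (l :: t) =
            pvRunB (PvMode.update, p, b ++ [l], ops) t := by
          simp [pvRunB, pvStepB, hS]
        rw [hstep, ih]
        simp [pvCont, pvContU, pvNotHdr, hS]

-- ===== VERDICT (by name: the statement is the Claim_ definition above) =====
theorem parse_begin_patch_py_spec : Claim_equal_parse_begin_patch_py := by
  intro patch _
  show parse_begin_patch_py patch = parse_begin_patch_py_alt patch
  rw [parse_begin_patch_py, parse_begin_patch_py_alt]
  have := pv_main (PySem.Str.splitlines patch) PvMode.none "" [] []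
  simpa [pvRunB, pvCont] using this.symm
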